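-- pv_equiv track=rewrite | github.com/GiovanniSpisso/UOT-FW | FW_1dim_trunc.py | matrix_indices_to_vector_index
-- ===== SOURCE A (Python) =====
-- def matrix_indices_to_vector_index(i, j, n, R):
--     """
--     Convert matrix indices (i, j) to vector index.
--     Returns None if (i, j) is outside the truncated support.
--
--     Parameters:
--       i, j: matrix indices
--       n: dimension of the matrix
--       R: truncation radius
--
--     Returns:
--       idx: index in the vector representation, or None if outside support
--     """
--     k = j - i
--
--     # Check if diagonal k is within truncation radius
--     if not (-R < k < R):
--         return None
--
--     # Find position of diagonal k
--     pos = 0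
--     for diag in range(-R + 1, k):
--         pos += n - abs(diag)
--
--     # Find position within diagonal k
--     if k >= 0:
--         offset = i
--     else:
--         offset = j
--
--     return pos + offset
-- ===== SOURCE B (Python) =====
-- def matrix_indices_to_vector_index(i, j, n, R):
--     """Closed-form O(1): diagonal offset via triangular-number sums instead of a loop."""
--     k = j - i
--     if not (-R < k < R):
--         return None
--     t = lambda x: x * (x + 1) // 2
--     # sum of |d| for d in [-R+1, k-1]
--     abs_sum = t(R - 1) + (t(k - 1) if k >= 0 else -t(-k))
--     pos = n * (k + R - 1) - abs_sum
--     return pos + (i if k >= 0 else j)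
-- ===== Notes on version B (the rewrite author's own statement) =====
-- stated objective: faster
-- what changed: Replaces the O(R) loop summing diagonal lengths with a closed-form triangular-number formula computed in O(1).
import Mathlib
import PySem

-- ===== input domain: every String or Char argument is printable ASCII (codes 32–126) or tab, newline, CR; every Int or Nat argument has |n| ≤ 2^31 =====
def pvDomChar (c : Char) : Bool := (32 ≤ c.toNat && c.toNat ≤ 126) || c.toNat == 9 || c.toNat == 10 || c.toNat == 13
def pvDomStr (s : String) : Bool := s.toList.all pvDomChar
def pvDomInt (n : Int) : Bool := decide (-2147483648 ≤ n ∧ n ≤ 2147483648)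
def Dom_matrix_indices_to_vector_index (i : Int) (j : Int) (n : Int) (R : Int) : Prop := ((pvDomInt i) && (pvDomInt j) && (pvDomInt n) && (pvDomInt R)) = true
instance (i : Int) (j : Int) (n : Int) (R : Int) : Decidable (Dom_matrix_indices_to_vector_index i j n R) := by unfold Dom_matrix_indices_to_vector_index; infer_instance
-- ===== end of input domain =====

-- ===== PORT A =====
-- B changes a linear loop over diagonals into a closed-form triangular-number formula (faster).
def matrix_indices_to_vector_index (i : Int) (j : Int) (n : Int) (R : Int) : Option Int :=
  let k := j - i
  if ¬ (-R < k ∧ k < R) then none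
  else
    let pos := List.foldl (fun pos diag => pos + (n - |diag|)) 0 (PySem.List.pyRange (-R + 1) k 1)
    let offset := if k ≥ 0 then i else j
    some (pos + offset)

-- ===== PORT B =====
def pvTri (x : Int) : Int := PySem.Int.floordiv (x * (x + 1)) 2

def matrix_indices_to_vector_index_alt (i : Int) (j : Int) (n : Int) (R : Int) : Option Int :=
  let k := j - i
  if ¬ (-R < k ∧ k < R) then none
  else
    let absSum := pvTri (R - 1) + (if k ≥ 0 then pvTri (k - 1) else -pvTri (-k))
    let pos := n * (k + R - 1) - absSum
    some (pos + (if k ≥ 0 then i else j))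

-- ===== PRECONDITION & SPEC =====
def Spec_matrix_indices_to_vector_index (i : Int) (j : Int) (n : Int) (R : Int) (out : Option Int) : Prop := out = matrix_indices_to_vector_index_alt i j n R
instance (i : Int) (j : Int) (n : Int) (R : Int) (out : Option Int) : Decidable (Spec_matrix_indices_to_vector_index i j n R out) := by unfold Spec_matrix_indices_to_vector_index; infer_instance

-- ===== CLAIM (what is proved, stated in full; the proofs are below) =====
def Claim_equal_matrix_indices_to_vector_index : Prop := ∀ (i : Int) (j : Int) (n : Int) (R : Int), Dom_matrix_indices_to_vector_index i j n R → Spec_matrix_indices_to_vector_index i j n R (matrix_indices_to_vector_index i j n R)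


-- ===== LEMMAS AND PROOFS =====
theorem pvTri_two_mul (x : Int) : 2 * pvTri x = x * (x + 1) := by
  obtain ⟨m, hm⟩ := Int.even_mul_succ_self x
  rw [pvTri, PySem.Int.floordiv_eq_ediv_of_pos (by omega)]
  omega

-- signed prefix abs-sum: pvG b - pvG a = Σ_{d ∈ [a,b)} |d|
def pvG (x : Int) : Int := if 0 ≤ x then pvTri (x - 1) else -pvTri (-x)

theorem pvG_step (a : Int) : pvG (a + 1) = pvG a + |a| := by
  rcases Int.lt_or_le a 0 with h | h
  · rcases Int.lt_or_le (a + 1) 0 with h' | h'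
    · rw [abs_of_neg h]
      simp only [pvG, if_neg (by omega : ¬ (0:Int) ≤ a + 1), if_neg (by omega : ¬ (0:Int) ≤ a)]
      have h3 := pvTri_two_mul (-a)
      have h4 := pvTri_two_mul (-(a + 1))
      ring_nf at h3 h4 ⊢
      linarith
    · have ha : a = -1 := by omega
      subst ha; decide
  · rw [abs_of_nonneg h]
    simp only [pvG, if_pos (by omega : (0:Int) ≤ a + 1), if_pos h]
    have hx : a + 1 - 1 = a := by ring
    rw [hx]
    have h3 := pvTri_two_mul a
    have h4 := pvTri_two_mul (a - 1)
    ring_nf at h3 h4 ⊢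
    linarith

theorem pvLoop (n : Int) : ∀ (m : Nat) (a s : Int),
    List.foldl (fun pos diag => pos + (n - |diag|)) s (PySem.List.pyRange a (a + m) 1)
      = s + n * m - (pvG (a + m) - pvG a) := by
  intro m
  induction m with
  | zero => intro a s; simp [PySem.List.pyRange]
  | succ m ih =>
    intro a s
    rw [PySem.List.pyRange_one_cons (by push_cast; omega)]
    simp only [List.foldl_cons]
    have hrec := ih (a + 1) (s + (n - |a|))
    have hg := pvG_step a
    have harr : a + 1 + (m : Int) = a + ((m : Int) + 1) := by ring
    rw [harr] at hrec
    push_cast at hrec ⊢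
    rw [hrec, hg]; ring

theorem matrix_indices_to_vector_index_eq (i j n R : Int) :
    matrix_indices_to_vector_index i j n R = matrix_indices_to_vector_index_alt i j n R := by
  unfold matrix_indices_to_vector_index matrix_indices_to_vector_index_alt
  dsimp only
  by_cases h : -R < j - i ∧ j - i < R
  · rw [if_neg (not_not_intro h), if_neg (not_not_intro h)]
    obtain ⟨h1, h2⟩ := h
    have hR : 1 ≤ R := by omega
    obtain ⟨m, hm⟩ : ∃ m : Nat, j - i = (-R + 1) + (m : Int) :=
      ⟨(j - i + R - 1).toNat, by omega⟩
    rw [hm, pvLoop n m (-R + 1) 0, ← hm]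
    have hga : pvG (-R + 1) = -pvTri (R - 1) := by
      rcases Int.lt_or_le (-R + 1) 0 with h' | h'
      · rw [pvG, if_neg (by omega)]
        have hx : -(-R + 1) = R - 1 := by ring
        rw [hx]
      · have hR1 : R = 1 := by omega
        subst hR1; norm_num [pvG, pvTri, PySem.Int.floordiv]
    have hgk : pvG (j - i) = if j - i ≥ 0 then pvTri (j - i - 1) else -pvTri (-(j - i)) := by
      rw [pvG]
    have hnm : j - i + R - 1 = (m : Int) := by omega
    rw [hga, hgk, hnm]
    congr 1
    split_ifs <;> omega
  · rw [if_pos h, if_pos h]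

-- ===== VERDICT (by name: the statement is the Claim_ definition above) =====
theorem matrix_indices_to_vector_index_spec : Claim_equal_matrix_indices_to_vector_index := by
  intro i j n R _
  unfold Spec_matrix_indices_to_vector_index
  exact matrix_indices_to_vector_index_eq i j n R
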